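-- pv_equiv track=rewrite | github.com/upunaprosk/CNF-DNF-converter | cnf_dnf.py | Idempotency
-- ===== SOURCE A (Python) =====
-- import copy
--
-- def Idempotency(Tree, symbol):
--     # Idempotency A\/A = A
--     for i in range(0, len(Tree)):
--         k = list(set(Tree[i]))
--         Tree[i] = sorted(k)
--     Tree = sorted(Tree)
--     Result = copy.deepcopy(Tree)
--     for i in range(0, len(Tree) - 1):
--         if (Tree[i] == Tree[i + 1]):
--             Result.remove(Tree[i])
--     Result = [set(i) for i in Result]
--     Tree = Result
--     Result = copy.deepcopy(Tree)
--     # Absorption A\/(A/\B) = A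
--     for i in range(0, len(Tree)):
--         for j in range(0, len(Tree)):
--             if i != j and len(Tree[i]) < len(Tree[j]):
--                 if Tree[j] in Result and Tree[i].intersection(Tree[j]) == Tree[i]:
--                     Result.remove(Tree[j])
--     return Result
-- ===== SOURCE B (Python) =====
-- def Idempotency(Tree, symbol):
--     # Idempotency A\/A = A  (same in-place normalisation of the argument as A)
--     for i in range(0, len(Tree)):
--         Tree[i] = sorted(set(Tree[i]))
--     # dedup via a set of tuples instead of sort-then-remove-adjacent
--     uniq = sorted(set(map(tuple, Tree)))
--     sets = [set(c) for c in uniq]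
--     # Absorption: one forward pass over the clauses in ascending-size order,
--     # keeping only clauses with no proper subset already kept
--     kept = []
--     for c in sorted(sets, key=len):
--         if not any(s < c for s in kept):
--             kept.append(c)
--     return [c for c in sets if c in kept]
-- ===== Notes on version B (the rewrite author's own statement) =====
-- stated objective: alternative
-- what changed: B dedups the normalised clauses with a set of tuples plus one sort instead of A's sort-then-remove-adjacent loop, and replaces A's all-pairs absorption double loop (with in-list removal) by a single forward pass over the clauses in ascending-size order that keeps a clause only if no already-kept set is a proper subset of it, finally filtering the sorted clause list by membership in the kept list.
import Mathlib
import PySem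

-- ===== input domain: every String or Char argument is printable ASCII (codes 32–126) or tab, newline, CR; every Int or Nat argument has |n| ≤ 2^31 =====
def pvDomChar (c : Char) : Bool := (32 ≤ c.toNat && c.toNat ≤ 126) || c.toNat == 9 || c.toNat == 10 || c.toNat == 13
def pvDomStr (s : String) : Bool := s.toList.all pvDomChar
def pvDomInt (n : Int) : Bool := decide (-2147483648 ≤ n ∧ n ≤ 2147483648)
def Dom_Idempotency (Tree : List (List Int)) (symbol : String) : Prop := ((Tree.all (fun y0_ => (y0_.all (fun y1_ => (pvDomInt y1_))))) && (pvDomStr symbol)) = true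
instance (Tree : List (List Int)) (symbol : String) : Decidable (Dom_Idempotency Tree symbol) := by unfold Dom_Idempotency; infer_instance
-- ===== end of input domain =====

-- B replaces A's sort-then-remove-adjacent dedup by a set-of-tuples dedup and A's all-pairs
-- absorption double loop by one forward pass over the clauses in ascending-size order (objective:
-- alternative).  A mutates its argument's inner lists in place (Source B performs the same mutation);
-- the equivalence proved here is about the return value.  Python returns a list of SETS of ints;
-- per the type convention each set is a PySem.Set Int (its distinct elements).

-- ===== PORT A =====
-- 'v in Result' where Result holds Python sets: list membership by set equality
def pyMemSet (R : List (PySem.Set Int)) (v : PySem.Set Int) : Bool :=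
  R.any (fun s => PySem.Set.equal s v)

-- Result.remove(v) on a list of Python sets: drop the FIRST set-equal element
-- (exact: A only calls it under the membership guard, so ValueError never occurs)
def pyRemoveSet : List (PySem.Set Int) → PySem.Set Int → List (PySem.Set Int)
  | [], _ => []
  | s :: rest, v => if PySem.Set.equal s v then rest else s :: pyRemoveSet rest v

def Idempotency (Tree : List (List Int)) (symbol : String) : List (List Int) :=
  -- for i in range(0, len(Tree)): Tree[i] = sorted(list(set(Tree[i])))
  let tree1 : List (List Int) := Tree.map (fun t => PySem.List.sorted (PySem.Set.ofList t) (fun x => x))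
  -- Tree = sorted(Tree)
  let tree2 : List (List Int) := PySem.List.sorted tree1 (fun x => x)
  -- Result = deepcopy(Tree); for i in range(0, len(Tree)-1): if Tree[i]==Tree[i+1]: Result.remove(Tree[i])
  -- (Result.remove never raises here: the sorted list still holds a copy of each duplicated clause)
  let result1 : List (List Int) := (PySem.List.pyRange 0 ((tree2.length : Int) - 1) 1).foldl
    (fun R i =>
      if PySem.List.pyGetD tree2 i [] == PySem.List.pyGetD tree2 (i+1) [] then
        (PySem.List.remove? R (PySem.List.pyGetD tree2 i [])).getD R
      else R) tree2
  -- Result = [set(i) for i in Result]; Tree = Result; Result = deepcopy(Tree)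
  let tree3 : List (PySem.Set Int) := result1.map (fun c => PySem.Set.ofList c)
  -- absorption double loop
  (PySem.List.pyRange 0 (tree3.length : Int) 1).foldl (fun R i =>
    (PySem.List.pyRange 0 (tree3.length : Int) 1).foldl (fun R j =>
      if i ≠ j ∧ PySem.Set.len (PySem.List.pyGetD tree3 i []) < PySem.Set.len (PySem.List.pyGetD tree3 j []) then
        if pyMemSet R (PySem.List.pyGetD tree3 j []) = true ∧
           PySem.Set.equal (PySem.Set.inter (PySem.List.pyGetD tree3 i []) (PySem.List.pyGetD tree3 j []))
             (PySem.List.pyGetD tree3 i []) = true then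
          pyRemoveSet R (PySem.List.pyGetD tree3 j [])
        else R
      else R) R) tree3

-- ===== PORT B =====
def Idempotency_alt (Tree : List (List Int)) (symbol : String) : List (List Int) :=
  -- for i in range(0, len(Tree)): Tree[i] = sorted(set(Tree[i]))
  let norm : List (List Int) := Tree.map (fun t => PySem.List.sorted (PySem.Set.ofList t) (fun x => x))
  -- uniq = sorted(set(map(tuple, Tree)))   (tuple(list of ints) is the list itself under the convention)
  let uniq : List (List Int) := PySem.List.sorted (PySem.Set.ofList norm) (fun x => x)
  -- sets = [set(c) for c in uniq]
  let sets : List (PySem.Set Int) := uniq.map (fun c => PySem.Set.ofList c)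
  -- kept = []; for c in sorted(sets, key=len): if not any(s < c for s in kept): kept.append(c)
  let kept : List (PySem.Set Int) := (PySem.List.sorted sets (fun c => PySem.Set.len c)).foldl
    (fun kept c =>
      if kept.any (fun s => PySem.Set.issubset s c && !(PySem.Set.equal s c)) then kept
      else kept ++ [c]) []
  -- return [c for c in sets if c in kept]
  sets.filter (fun c => kept.any (fun s => PySem.Set.equal s c))

-- ===== PRECONDITION & SPEC =====
def Spec_Idempotency (Tree : List (List Int)) (symbol : String) (out : List (List Int)) : Prop := out = Idempotency_alt Tree symbol
instance (Tree : List (List Int)) (symbol : String) (out : List (List Int)) : Decidable (Spec_Idempotency Tree symbol out) := by unfold Spec_Idempotency; infer_instance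

-- ===== CLAIM (what is proved, stated in full; the proofs are below) =====
def Claim_equal_Idempotency : Prop := ∀ (Tree : List (List Int)) (symbol : String), Dom_Idempotency Tree symbol → Spec_Idempotency Tree symbol (Idempotency Tree symbol)

-- strictly increasing canonical clause (what sorted(set(..)) produces)
def CanonL (c : List Int) : Prop := c.Pairwise (· < ·)

lemma canon_nodup {c : List Int} (h : CanonL c) : c.Nodup := h.imp (fun hlt => ne_of_lt hlt)

-- "c has no proper subset of smaller size in U" — the common characterisation both ports reach
def minB (U : List (List Int)) (c : List Int) : Bool :=
  !(U.any (fun d => decide (d.length < c.length) && decide (d ⊆ c)))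

-- fold over adjacent pairs (the shape of A's duplicate-removal index loop)
def pairFold {α β : Type} (h : β → α → α → β) : List α → β → β
  | x :: y :: t, R => pairFold h (y :: t) (h R x y)
  | _, R => R

lemma foldl_range_adj {α β : Type} (h : β → α → α → β) (d : α) :
    ∀ (S : List α) (init : β),
      (List.range (S.length - 1)).foldl (fun R k => h R (S.getD k d) (S.getD (k+1) d)) init
        = pairFold h S init
  | [], init => by simp [pairFold]
  | [x], init => by simp [pairFold]
  | x :: y :: t, init => by
      have h1 : (x :: y :: t).length - 1 = t.length + 1 := by simp
      rw [h1, List.range_succ_eq_map, List.foldl_cons, List.foldl_map]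
      have h2 : (fun R k => h R ((x :: y :: t).getD (Nat.succ k) d) ((x :: y :: t).getD (Nat.succ k + 1) d))
          = (fun R k => h R ((y :: t).getD k d) ((y :: t).getD (k+1) d)) := by
        funext R k; simp
      rw [h2]
      have h3 : t.length = (y :: t).length - 1 := by simp
      have h4 : h init ((x :: y :: t).getD 0 d) ((x :: y :: t).getD (0+1) d) = h init x y := by simp
      rw [h4, h3, foldl_range_adj h d (y :: t) (h init x y)]
      simp [pairFold]

lemma remove?_append_of_not_mem {α : Type} [BEq α] [LawfulBEq α] (v : α) :
    ∀ (P l : List α), v ∉ P →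
      PySem.List.remove? (P ++ l) v = (PySem.List.remove? l v).map (fun t => P ++ t)
  | [], l, _ => by simp
  | p :: P, l, h => by
      have hp : p ≠ v := fun e => h (by simp [e])
      have hP : v ∉ P := fun e => h (by simp [e])
      rw [List.cons_append, PySem.List.remove?_cons_of_ne _ hp,
        remove?_append_of_not_mem v P l hP, Option.map_map]
      rfl

lemma discard_cons_self {α : Type} [BEq α] [LawfulBEq α] (s : List α) (x : α) :
    PySem.Set.discard (x :: s) x = PySem.Set.discard s x := by
  simp [PySem.Set.discard]

lemma discard_discard {α : Type} [BEq α] [LawfulBEq α] (s : List α) (x : α) :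
    PySem.Set.discard (PySem.Set.discard s x) x = PySem.Set.discard s x := by
  simp [PySem.Set.discard, List.filter_filter]

lemma discard_of_not_mem {α : Type} [BEq α] [LawfulBEq α] {s : List α} {x : α} (h : x ∉ s) :
    PySem.Set.discard s x = s := by
  simp only [PySem.Set.discard]
  refine List.filter_eq_self.2 (fun a ha => ?_)
  have : a ≠ x := fun e => h (e ▸ ha)
  simp [this]

lemma dedup_cons_cons_self (x : List Int) (t : List (List Int)) :
    PySem.List.dedup (x :: x :: t) = PySem.List.dedup (x :: t) := by
  simp only [PySem.List.dedup_eq_ofList, PySem.Set.ofList_cons, discard_cons_self, discard_discard]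

lemma dedup_cons_of_not_mem {x : List Int} {t : List (List Int)} (h : x ∉ t) :
    PySem.List.dedup (x :: t) = x :: PySem.List.dedup t := by
  simp only [PySem.List.dedup_eq_ofList, PySem.Set.ofList_cons]
  rw [discard_of_not_mem (by rw [PySem.Set.mem_ofList]; exact h)]

lemma foldl_ext {α β : Type} (f g : β → α → β) (h : ∀ b a, f b a = g b a) :
    ∀ (l : List α) (init : β), l.foldl f init = l.foldl g init
  | [], _ => rfl
  | a :: l, init => by rw [List.foldl_cons, List.foldl_cons, h, foldl_ext f g h l]

def stepDedup (R : List (List Int)) (a b : List Int) : List (List Int) :=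
  if a == b then (PySem.List.remove? R a).getD R else R

lemma pairFold_dedup : ∀ (S P : List (List Int)), S.Pairwise (· ≤ ·) → (∀ v ∈ S, v ∉ P) →
    pairFold stepDedup S (P ++ S) = P ++ PySem.List.dedup S
  | [], P, _, _ => by simp [pairFold, PySem.List.dedup_eq_ofList, PySem.Set.ofList]
  | [x], P, _, _ => by
      simp [pairFold, PySem.List.dedup_eq_ofList, PySem.Set.ofList]
  | x :: y :: t, P, hp, hP => by
      by_cases hxy : x = y
      · subst hxy
        have hx : x ∉ P := hP x (by simp)
        have hstep : stepDedup (P ++ x :: x :: t) x x = P ++ (x :: t) := by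
          rw [stepDedup, if_pos (by simp), remove?_append_of_not_mem x P _ hx,
            PySem.List.remove?_cons_self]
          rfl
        rw [pairFold, hstep,
          pairFold_dedup (x :: t) P (hp.sublist (by simp)) (fun v hv => hP v (by
            rcases List.mem_cons.1 hv with rfl | hv
            · simp
            · simp [hv])),
          dedup_cons_cons_self]
      · -- x ≠ y: x < every later element
        have hxy' : x ≤ y := List.rel_of_pairwise_cons hp (by simp)
        have hlt : ∀ v ∈ y :: t, x < v := by
          intro v hv
          rcases List.mem_cons.1 hv with rfl | hv
          · exact lt_of_le_of_ne hxy' hxy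
          · exact lt_of_lt_of_le (lt_of_le_of_ne hxy' hxy)
              (List.rel_of_pairwise_cons (hp.sublist (by simp)) hv)
        have hstep : stepDedup (P ++ x :: y :: t) x y = P ++ x :: y :: t := by
          rw [stepDedup, if_neg]; simp [hxy]
        have happ : P ++ x :: y :: t = (P ++ [x]) ++ (y :: t) := by simp
        rw [pairFold, hstep, happ,
          pairFold_dedup (y :: t) (P ++ [x]) (hp.sublist (by simp)) (fun v hv => by
            simp only [List.mem_append, List.mem_singleton]
            rintro (hvP | rfl)
            · exact hP v (List.mem_cons.2 (Or.inr hv)) hvP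
            · exact absurd rfl (ne_of_gt (hlt v hv))),
          dedup_cons_of_not_mem (fun hx => absurd rfl (ne_of_gt (hlt x hx)))]
        simp

lemma A_dedup (S : List (List Int)) (hS : S.Pairwise (· ≤ ·)) :
    (PySem.List.pyRange 0 ((S.length : Int) - 1) 1).foldl
      (fun R i => if PySem.List.pyGetD S i [] == PySem.List.pyGetD S (i+1) [] then
          (PySem.List.remove? R (PySem.List.pyGetD S i [])).getD R else R) S
    = PySem.List.dedup S := by
  have htn : ((S.length : Int) - 1).toNat = S.length - 1 := by omega
  have hrange : PySem.List.pyRange 0 ((S.length : Int) - 1) 1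
      = (List.range (S.length - 1)).map (fun k => ((k : Nat) : Int)) := by
    rw [PySem.List.pyRange_zero, htn]
  rw [hrange, List.foldl_map,
    foldl_ext _ (fun R k => stepDedup R (S.getD k []) (S.getD (k+1) [])) (by
      intro R k
      have hcast : ((k : Int) + 1) = ((k+1 : Nat) : Int) := by push_cast; ring
      show (if PySem.List.pyGetD S ((k : Nat) : Int) [] == PySem.List.pyGetD S (((k : Nat) : Int)+1) [] then
        (PySem.List.remove? R (PySem.List.pyGetD S ((k : Nat) : Int) [])).getD R else R) = _
      rw [hcast, PySem.List.pyGetD_natCast, PySem.List.pyGetD_natCast]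
      rfl),
    foldl_range_adj stepDedup [] S S]
  have := pairFold_dedup S [] hS (by simp)
  simpa using this

lemma canonEqual {s v : List Int} (hs : CanonL s) (hv : CanonL v) :
    (PySem.Set.equal s v = true) ↔ s = v := by
  constructor
  · intro h
    have hm := (PySem.Set.equal_iff s v).1 h
    have hperm : s.Perm v := (List.perm_ext_iff_of_nodup (canon_nodup hs) (canon_nodup hv)).2 hm
    exact PySem.List.eq_of_perm_of_pairwise_le_of_injective (fun x => x) (fun a b h => h)
      hperm (hs.imp le_of_lt) (hv.imp le_of_lt)
  · rintro rfl
    exact (PySem.Set.equal_iff s s).2 (fun x => Iff.rfl)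

lemma pyMemSet_iff {R : List (PySem.Set Int)} {v : PySem.Set Int}
    (hR : ∀ s ∈ R, CanonL s) (hv : CanonL v) : pyMemSet R v = true ↔ v ∈ R := by
  rw [pyMemSet, List.any_eq_true]
  constructor
  · rintro ⟨s, hs, he⟩
    exact (canonEqual (hR s hs) hv).1 he ▸ hs
  · intro h
    exact ⟨v, h, (canonEqual hv hv).2 rfl⟩

lemma pyRemoveSet_of_not_mem {v : PySem.Set Int} (hv : CanonL v) :
    ∀ {R : List (PySem.Set Int)}, (∀ s ∈ R, CanonL s) → v ∉ R → pyRemoveSet R v = R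
  | [], _, _ => rfl
  | s :: R, hR, h => by
      have hne : s ≠ v := fun e => h (by simp [e])
      have : PySem.Set.equal s v = false := by
        rw [Bool.eq_false_iff]; exact fun he => hne ((canonEqual (hR s (by simp)) hv).1 he)
      rw [pyRemoveSet, this]
      simp only [Bool.false_eq_true, if_false]
      rw [pyRemoveSet_of_not_mem hv (fun t ht => hR t (by simp [ht])) (fun e => h (by simp [e]))]

lemma pyRemoveSet_filter (q : PySem.Set Int → Bool) (v : PySem.Set Int) (hv : CanonL v) :
    ∀ (U : List (PySem.Set Int)), U.Nodup → (∀ s ∈ U, CanonL s) → v ∈ U →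
      pyRemoveSet (U.filter q) v = U.filter (fun c => q c && !(c == v))
  | [], _, _, hvU => absurd hvU (by simp)
  | u :: U, hU, hc, hvU => by
      have hcU : ∀ s ∈ U, CanonL s := fun s hs => hc s (by simp [hs])
      by_cases huv : u = v
      · subst huv
        have hvnotU : u ∉ U := (List.nodup_cons.1 hU).1
        have hfilt : U.filter (fun c => q c && !(c == u)) = U.filter q := by
          apply List.filter_congr
          intro c hcmem
          have : (c == u) = false := by
            rw [beq_eq_false_iff_ne]; exact fun e => hvnotU (e ▸ hcmem)
          simp [this]
        by_cases hq : q u = true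
        · rw [List.filter_cons_of_pos hq, pyRemoveSet, (canonEqual (hc u (by simp)) hv).2 rfl]
          simp only [if_true]
          rw [List.filter_cons_of_neg (by simp), hfilt]
        · rw [List.filter_cons_of_neg hq, List.filter_cons_of_neg (by simp [hq]), hfilt,
            pyRemoveSet_of_not_mem hv (fun s hs => hcU s (List.mem_of_mem_filter hs))
              (fun hvf => hvnotU (List.mem_of_mem_filter hvf))]
      · have hvU' : v ∈ U := by
          rcases List.mem_cons.1 hvU with e | h
          · exact absurd e.symm huv
          · exact h
        have hne : PySem.Set.equal u v = false := by
          rw [Bool.eq_false_iff]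
          exact fun he => huv ((canonEqual (hc u (by simp)) hv).1 he)
        have hbu : (u == v) = false := by rw [beq_eq_false_iff_ne]; exact huv
        have hrec := pyRemoveSet_filter q v hv U (List.nodup_cons.1 hU).2 hcU hvU'
        by_cases hq : q u = true
        · rw [List.filter_cons_of_pos hq, List.filter_cons_of_pos (by simp [hq, hbu]),
            pyRemoveSet, hne]
          simp only [Bool.false_eq_true, if_false]
          rw [hrec]
        · rw [List.filter_cons_of_neg hq, List.filter_cons_of_neg (by simp [hq]), hrec]

def allPairs (n : Nat) : List (Nat × Nat) :=
  (List.range n).flatMap (fun i => (List.range n).map (fun j => (i, j)))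

lemma mem_allPairs {n : Nat} {p : Nat × Nat} : p ∈ allPairs n ↔ p.1 < n ∧ p.2 < n := by
  rcases p with ⟨i, j⟩
  simp only [allPairs, List.mem_flatMap, List.mem_map, List.mem_range, Prod.mk.injEq]
  constructor
  · rintro ⟨a, ha, b, hb, e1, e2⟩
    subst e1; subst e2; exact ⟨ha, hb⟩
  · rintro ⟨hi, hj⟩
    exact ⟨i, hi, j, hj, rfl, rfl⟩

def stepAbs (U : List (PySem.Set Int)) (R : List (PySem.Set Int)) (p : Nat × Nat) :
    List (PySem.Set Int) :=
  if p.1 ≠ p.2 ∧ PySem.Set.len (U.getD p.1 []) < PySem.Set.len (U.getD p.2 []) then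
    if pyMemSet R (U.getD p.2 []) = true ∧
       PySem.Set.equal (PySem.Set.inter (U.getD p.1 []) (U.getD p.2 [])) (U.getD p.1 []) = true then
      pyRemoveSet R (U.getD p.2 [])
    else R
  else R

lemma A_abs_eq_pairsFold (U : List (PySem.Set Int)) :
    (PySem.List.pyRange 0 (U.length : Int) 1).foldl (fun R i =>
      (PySem.List.pyRange 0 (U.length : Int) 1).foldl (fun R j =>
        if i ≠ j ∧ PySem.Set.len (PySem.List.pyGetD U i []) < PySem.Set.len (PySem.List.pyGetD U j []) then
          if pyMemSet R (PySem.List.pyGetD U j []) = true ∧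
             PySem.Set.equal (PySem.Set.inter (PySem.List.pyGetD U i []) (PySem.List.pyGetD U j []))
               (PySem.List.pyGetD U i []) = true then
            pyRemoveSet R (PySem.List.pyGetD U j [])
          else R
        else R) R) U
    = (allPairs U.length).foldl (stepAbs U) U := by
  have hrange : PySem.List.pyRange 0 (U.length : Int) 1
      = (List.range U.length).map (fun k => ((k : Nat) : Int)) := by
    rw [PySem.List.pyRange_zero, Int.toNat_natCast]
  rw [hrange, allPairs, List.foldl_flatMap, List.foldl_map]
  apply foldl_ext
  intro R i
  rw [List.foldl_map, List.foldl_map]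
  apply foldl_ext
  intro R j
  show (if (i : Int) ≠ (j : Int) ∧ PySem.Set.len (PySem.List.pyGetD U (i : Int) []) < PySem.Set.len (PySem.List.pyGetD U (j : Int) []) then _ else _) = _
  rw [PySem.List.pyGetD_natCast, PySem.List.pyGetD_natCast, stepAbs]
  have hcast : ((i : Int) ≠ (j : Int)) = (i ≠ j) := by
    simp
  simp only [hcast]

def hitB (U : List (PySem.Set Int)) (p : Nat × Nat) (c : PySem.Set Int) : Bool :=
  decide (p.1 ≠ p.2) &&
  decide (PySem.Set.len (U.getD p.1 []) < PySem.Set.len (U.getD p.2 [])) &&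
  PySem.Set.equal (PySem.Set.inter (U.getD p.1 []) (U.getD p.2 [])) (U.getD p.1 []) &&
  (c == U.getD p.2 [])

def noHit (U : List (PySem.Set Int)) (L : List (Nat × Nat)) (c : PySem.Set Int) : Bool :=
  L.all (fun p => !hitB U p c)

lemma absFold (U : List (PySem.Set Int)) (hU : U.Nodup) (hc : ∀ s ∈ U, CanonL s) :
    ∀ (ps L : List (Nat × Nat)), (∀ p ∈ ps, p.2 < U.length) →
      ps.foldl (stepAbs U) (U.filter (noHit U L)) = U.filter (noHit U (L ++ ps))
  | [], L, _ => by simp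
  | p :: ps, L, hps => by
      have hv : U.getD p.2 [] ∈ U := by
        rw [List.getD_eq_getElem U [] (hps p (by simp))]
        exact List.getElem_mem _
      have hvc : CanonL (U.getD p.2 []) := hc _ hv
      have hfc : ∀ s ∈ U.filter (noHit U L), CanonL s :=
        fun s hs => hc s (List.mem_of_mem_filter hs)
      have hext : ∀ c, noHit U (L ++ [p]) c = (noHit U L c && !(hitB U p c)) := by
        intro c; simp [noHit, List.all_append]
      have hstep : stepAbs U (U.filter (noHit U L)) p = U.filter (noHit U (L ++ [p])) := by
        rw [stepAbs]
        by_cases h1 : p.1 ≠ p.2 ∧ PySem.Set.len (U.getD p.1 []) < PySem.Set.len (U.getD p.2 [])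
        · rw [if_pos h1]
          by_cases h2 : PySem.Set.equal (PySem.Set.inter (U.getD p.1 []) (U.getD p.2 []))
              (U.getD p.1 []) = true
          · have hhit : ∀ c, hitB U p c = (c == U.getD p.2 []) := by
              intro c
              rw [hitB, decide_eq_true h1.1, decide_eq_true h1.2, h2]
              simp
            by_cases h3 : pyMemSet (U.filter (noHit U L)) (U.getD p.2 []) = true
            · rw [if_pos ⟨h3, h2⟩,
                pyRemoveSet_filter (noHit U L) (U.getD p.2 []) hvc U hU hc hv]
              apply List.filter_congr
              intro c _
              rw [hext c, hhit c]
            · rw [if_neg (fun hand => h3 hand.1)]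
              apply List.filter_congr
              intro c hcmem
              rw [hext c, hhit c]
              by_cases hcv : c = U.getD p.2 []
              · have hn : noHit U L c = false := by
                  rw [Bool.eq_false_iff]
                  intro hnl
                  exact h3 ((pyMemSet_iff hfc hvc).2 (hcv ▸ List.mem_filter.2 ⟨hcmem, hnl⟩))
                rw [hn]
                simp
              · have : (c == U.getD p.2 []) = false := by
                  rw [beq_eq_false_iff_ne]; exact hcv
                rw [this]
                simp
          · rw [if_neg (fun hand => h2 hand.2)]
            apply List.filter_congr
            intro c _
            rw [hext c, hitB, Bool.eq_false_iff.2 h2]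
            simp
        · rw [if_neg h1]
          apply List.filter_congr
          intro c _
          rw [hext c, hitB]
          rcases Decidable.not_and_iff_not_or_not.1 h1 with h | h
          · rw [decide_eq_false h]
            simp
          · rw [decide_eq_false h]
            simp
      rw [List.foldl_cons, hstep,
        absFold U hU hc ps (L ++ [p]) (fun q hq => hps q (by simp [hq]))]
      simp

lemma inter_equal_iff_subset (d c : PySem.Set Int) :
    PySem.Set.equal (PySem.Set.inter d c) d = true ↔ ∀ x ∈ d, x ∈ c := by
  rw [PySem.Set.equal_iff]
  constructor
  · intro h x hx
    exact ((PySem.Set.mem_inter d c x).1 ((h x).2 hx)).2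
  · intro h x
    rw [PySem.Set.mem_inter]
    exact ⟨fun hx => hx.1, fun hx => ⟨hx, h x hx⟩⟩

lemma minB_iff {U : List (List Int)} {c : List Int} :
    minB U c = true ↔ ∀ d ∈ U, ¬(d.length < c.length ∧ d ⊆ c) := by
  rw [minB, Bool.not_eq_true', List.any_eq_false]
  constructor
  · intro h d hd hcon
    exact h d hd (by rw [decide_eq_true hcon.1, decide_eq_true hcon.2]; rfl)
  · intro h d hd hcontra
    rw [Bool.and_eq_true, decide_eq_true_iff, decide_eq_true_iff] at hcontra
    exact h d hd ⟨hcontra.1, hcontra.2⟩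

lemma len_lt_iff {d c : PySem.Set Int} :
    PySem.Set.len d < PySem.Set.len c ↔ d.length < c.length := by
  rw [PySem.Set.len, PySem.Set.len]
  exact_mod_cast Iff.rfl

lemma noHit_allPairs (U : List (PySem.Set Int)) (c : PySem.Set Int) (hcU : c ∈ U) :
    noHit U (allPairs U.length) c = minB U c := by
  rw [Bool.eq_iff_iff, minB_iff, noHit, List.all_eq_true]
  constructor
  · intro h d hd hcon
    obtain ⟨i, hi, hdi⟩ := List.mem_iff_getElem.1 hd
    obtain ⟨j, hj, hcj⟩ := List.mem_iff_getElem.1 hcU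
    have hij : i ≠ j := by
      intro e; subst e; rw [hdi] at hcj; subst hcj; omega
    have hfalse := h (i, j) (mem_allPairs.2 ⟨hi, hj⟩)
    rw [Bool.not_eq_eq_eq_not, Bool.not_true, Bool.eq_false_iff] at hfalse
    apply hfalse
    rw [hitB]
    have hgd : U.getD i [] = d := by rw [List.getD_eq_getElem U [] hi, hdi]
    have hgc : U.getD j [] = c := by rw [List.getD_eq_getElem U [] hj, hcj]
    simp only [hgd, hgc]
    rw [decide_eq_true hij, decide_eq_true (len_lt_iff.2 hcon.1),
      (inter_equal_iff_subset d c).2 hcon.2]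
    simp
  · intro h p hp
    have : hitB U p c = false := by
      rw [Bool.eq_false_iff]
      intro hhit
      rw [hitB] at hhit
      simp only [Bool.and_eq_true, decide_eq_true_iff, beq_iff_eq] at hhit
      obtain ⟨⟨⟨hij, hlen⟩, hinter⟩, hcv⟩ := hhit
      have hd : U.getD p.1 [] ∈ U := by
        rw [List.getD_eq_getElem U [] (mem_allPairs.1 hp).1]
        exact List.getElem_mem _
      apply h _ hd
      refine ⟨?_, ?_⟩
      · rw [hcv]
        exact len_lt_iff.1 hlen
      · intro x hx
        rw [hcv]
        exact (inter_equal_iff_subset _ _).1 hinter x hx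
    rw [this]
    simp

lemma sortedLL_inst (xs : List (List Int)) :
    @PySem.List.sorted (List Int) (List Int) List.instLT (fun a b => a.decidableLT b) xs (fun x => x) false
      = @PySem.List.sorted (List Int) (List Int) List.instLinearOrder.toLT LinearOrder.toDecidableLT xs (fun x => x) false := by
  have e : (fun (a b : List Int) => a.decidableLT b) = (LinearOrder.toDecidableLT : DecidableLT (List Int)) := by
    funext a b; exact Subsingleton.elim _ _
  rw [e]

lemma ofList_sublist {α : Type} [BEq α] [LawfulBEq α] :
    ∀ (xs : List α), (PySem.Set.ofList xs).Sublist xs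
  | [] => List.nil_sublist []
  | x :: xs => by
      rw [PySem.Set.ofList_cons]
      refine List.Sublist.cons₂ x ?_
      have h1 : (PySem.Set.discard (PySem.Set.ofList xs) x).Sublist (PySem.Set.ofList xs) := by
        rw [PySem.Set.discard]
        exact List.filter_sublist
      exact h1.trans (ofList_sublist xs)

lemma pairwise_lt_of_le_nodup {α : Type} [LinearOrder α] {l : List α}
    (h1 : l.Pairwise (· ≤ ·)) (h2 : l.Nodup) : l.Pairwise (· < ·) :=
  (h1.and h2).imp (fun h => lt_of_le_of_ne h.1 h.2)

lemma uniq_eq (M : List (List Int)) :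
    PySem.List.sorted (PySem.Set.ofList M) (fun x => x)
      = PySem.List.dedup (PySem.List.sorted M (fun x => x)) := by
  rw [PySem.List.dedup_eq_ofList, sortedLL_inst]
  apply PySem.List.sorted_eq_of_perm_of_pairwise_lt
  · exact (List.perm_ext_iff_of_nodup (PySem.Set.nodup_ofList _) (PySem.Set.nodup_ofList _)).2
      (fun a => by rw [PySem.Set.mem_ofList, PySem.Set.mem_ofList, PySem.List.mem_sorted])
  · refine pairwise_lt_of_le_nodup ?_ (PySem.Set.nodup_ofList _)
    refine List.Pairwise.sublist (ofList_sublist _) ?_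
    rw [sortedLL_inst]
    exact PySem.List.sorted_pairwise M (fun x => x)

lemma canon_eq_of_subset_of_length_le {s c : List Int} (hs : CanonL s) (hc : CanonL c)
    (hsub : s ⊆ c) (hlen : c.length ≤ s.length) : s = c := by
  have hperm : s.Perm c := ((canon_nodup hs).subperm hsub).perm_of_length_le hlen
  exact PySem.List.eq_of_perm_of_pairwise_le_of_injective (fun x => x) (fun a b h => h)
    hperm (hs.imp le_of_lt) (hc.imp le_of_lt)

lemma strictB_iff {s c : List Int} (hs : CanonL s) (hc : CanonL c) :
    (PySem.Set.issubset s c && !(PySem.Set.equal s c)) = true ↔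
      (s.length < c.length ∧ s ⊆ c) := by
  rw [Bool.and_eq_true, Bool.not_eq_true', PySem.Set.issubset_iff]
  constructor
  · rintro ⟨hsub, hne⟩
    refine ⟨?_, hsub⟩
    by_contra hno
    push_neg at hno
    have : s = c := canon_eq_of_subset_of_length_le hs hc hsub hno
    rw [Bool.eq_false_iff] at hne
    exact hne ((canonEqual hs hc).2 this)
  · rintro ⟨hlt, hsub⟩
    refine ⟨hsub, ?_⟩
    rw [Bool.eq_false_iff]
    intro he
    have := (canonEqual hs hc).1 he
    subst this
    omega

lemma exists_min_subset (U : List (List Int)) :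
    ∀ (m : Nat) (d : List Int), d ∈ U → d.length ≤ m →
      ∀ (c : List Int), d.length < c.length → d ⊆ c →
        ∃ d₀ ∈ U, d₀.length < c.length ∧ d₀ ⊆ c ∧ minB U d₀ = true := by
  intro m
  induction m with
  | zero =>
      intro d hd hdm c hlt hsub
      refine ⟨d, hd, hlt, hsub, minB_iff.2 ?_⟩
      intro e he hcon
      omega
  | succ m ih =>
      intro d hd hdm c hlt hsub
      by_cases hmin : minB U d = true
      · exact ⟨d, hd, hlt, hsub, hmin⟩
      · have : ∃ e ∈ U, e.length < d.length ∧ e ⊆ d := by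
          by_contra hno
          push_neg at hno
          exact hmin (minB_iff.2 (fun e he hcon => hno e he hcon.1 hcon.2))
        obtain ⟨e, he, helen, hesub⟩ := this
        exact ih e he (by omega) c (by omega) (hesub.trans hsub)

def stepKept (kept : List (PySem.Set Int)) (c : PySem.Set Int) : List (PySem.Set Int) :=
  if kept.any (fun s => PySem.Set.issubset s c && !(PySem.Set.equal s c)) then kept
  else kept ++ [c]

lemma keptFold (U : List (List Int)) (hc : ∀ d ∈ U, CanonL d) :
    ∀ (T P : List (List Int)), (P ++ T).Perm U →
      (P ++ T).Pairwise (fun a b => a.length ≤ b.length) →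
      T.foldl stepKept (P.filter (minB U)) = (P ++ T).filter (minB U)
  | [], P, _, _ => by simp
  | c :: T', P, hperm, hpw => by
      have hcU : c ∈ U := hperm.subset (List.mem_append_right P (by simp))
      have hPU : ∀ s ∈ P, s ∈ U := fun s hs => hperm.subset (List.mem_append_left _ hs)
      have hcC : CanonL c := hc c hcU
      have key : (P.filter (minB U)).any (fun s => PySem.Set.issubset s c && !(PySem.Set.equal s c))
          = !(minB U c) := by
        rw [Bool.eq_iff_iff, List.any_eq_true, Bool.not_eq_true', Bool.eq_false_iff]
        constructor
        · rintro ⟨s, hsf, hstrict⟩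
          rcases List.mem_filter.1 hsf with ⟨hsP, _⟩
          have hsU : s ∈ U := hPU s hsP
          have := (strictB_iff (hc s hsU) hcC).1 hstrict
          intro hmin
          exact (minB_iff.1 hmin) s hsU ⟨this.1, this.2⟩
        · intro hnot
          have : ∃ d ∈ U, d.length < c.length ∧ d ⊆ c := by
            by_contra hno
            push_neg at hno
            exact hnot (minB_iff.2 (fun d hd hcon => hno d hd hcon.1 hcon.2))
          obtain ⟨d, hd, hdlen, hdsub⟩ := this
          obtain ⟨d₀, h₀U, h₀len, h₀sub, h₀min⟩ :=
            exists_min_subset U d.length d hd le_rfl c hdlen hdsub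
          have h₀P : d₀ ∈ P := by
            have h₀mem : d₀ ∈ P ++ c :: T' := hperm.symm.subset h₀U
            rcases List.mem_append.1 h₀mem with h | h
            · exact h
            · exfalso
              have hT : (c :: T').Pairwise (fun a b => a.length ≤ b.length) :=
                List.Pairwise.sublist (List.sublist_append_right P _) hpw
              rcases List.mem_cons.1 h with rfl | h
              · omega
              · have := List.rel_of_pairwise_cons hT h
                omega
          exact ⟨d₀, List.mem_filter.2 ⟨h₀P, h₀min⟩,
            (strictB_iff (hc d₀ h₀U) hcC).2 ⟨h₀len, h₀sub⟩⟩
      rw [List.foldl_cons, stepKept, key]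
      by_cases hm : minB U c = true
      · rw [hm]
        simp only [Bool.not_true, Bool.false_eq_true, if_false]
        have hfilt : P.filter (minB U) ++ [c] = (P ++ [c]).filter (minB U) := by
          rw [List.filter_append, List.filter_singleton, hm]
          rfl
        rw [hfilt, keptFold U hc T' (P ++ [c]) (by simpa using hperm) (by simpa using hpw)]
        simp
      · have hmf : minB U c = false := Bool.eq_false_iff.2 hm
        rw [hmf]
        simp only [Bool.not_false, if_true]
        have hfilt : P.filter (minB U) = (P ++ [c]).filter (minB U) := by
          rw [List.filter_append, List.filter_singleton, hmf]
          simp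
        rw [hfilt, keptFold U hc T' (P ++ [c]) (by simpa using hperm) (by simpa using hpw)]
        simp

lemma map_ofList_id {l : List (List Int)} (h : ∀ c ∈ l, CanonL c) :
    l.map (fun c => PySem.Set.ofList c) = l := by
  have h2 : l.map (fun c => PySem.Set.ofList c) = l.map id :=
    List.map_congr_left (fun c hc => PySem.Set.ofList_eq_self_of_nodup c (canon_nodup (h c hc)))
  rw [h2, List.map_id]

theorem Idempotency_spec : Claim_equal_Idempotency := by
  intro Tree symbol _
  rw [Spec_Idempotency, Idempotency, Idempotency_alt]
  -- shared first stage
  have hMcanon : ∀ c ∈ Tree.map (fun t => PySem.List.sorted (PySem.Set.ofList t) (fun x => x)),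
      CanonL c := by
    intro c hcm
    rcases List.mem_map.1 hcm with ⟨t, _, rfl⟩
    exact PySem.List.sorted_ofList_pairwise_lt t
  set M := Tree.map (fun t => PySem.List.sorted (PySem.Set.ofList t) (fun x => x)) with hM
  set S := PySem.List.sorted M (fun x => x) with hSdef
  have hS : S.Pairwise (· ≤ ·) := by
    rw [hSdef, sortedLL_inst]
    exact PySem.List.sorted_pairwise M (fun x => x)
  have hScanon : ∀ c ∈ S, CanonL c := by
    intro c hcm
    exact hMcanon c ((PySem.List.mem_sorted M _ false c).1 hcm)
  set U := PySem.List.dedup S with hUdef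
  have hUnodup : U.Nodup := by
    rw [hUdef, PySem.List.dedup_eq_ofList]
    exact PySem.Set.nodup_ofList S
  have hUcanon : ∀ c ∈ U, CanonL c := by
    intro c hcm
    refine hScanon c ?_
    rw [hUdef, PySem.List.dedup_eq_ofList] at hcm
    exact (PySem.Set.mem_ofList S c).1 hcm
  -- A side
  rw [A_dedup S hS, ← hUdef, map_ofList_id hUcanon, A_abs_eq_pairsFold U]
  have hinit : U.filter (noHit U []) = U := by
    simp [noHit]
  have habs := absFold U hUnodup hUcanon (allPairs U.length) []
    (fun p hp => (mem_allPairs.1 hp).2)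
  rw [hinit] at habs
  rw [habs]
  have hA : U.filter (noHit U (([] : List (Nat × Nat)) ++ allPairs U.length))
      = U.filter (minB U) := by
    apply List.filter_congr
    intro c hcm
    rw [List.nil_append]
    exact noHit_allPairs U c hcm
  rw [hA]
  -- B side
  rw [uniq_eq M, ← hSdef, ← hUdef, map_ofList_id hUcanon]
  set T := PySem.List.sorted U (fun c => PySem.Set.len c) with hTdef
  have hTperm : (([] : List (List Int)) ++ T).Perm U := by
    rw [List.nil_append, hTdef]
    exact PySem.List.sorted_perm U _ false
  have hTpw : (([] : List (List Int)) ++ T).Pairwise (fun a b => a.length ≤ b.length) := by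
    rw [List.nil_append, hTdef]
    refine (PySem.List.sorted_pairwise U (fun c => PySem.Set.len c)).imp ?_
    intro a b h
    rw [PySem.Set.len, PySem.Set.len] at h
    exact_mod_cast h
  have hTcanon : ∀ c ∈ T, CanonL c := by
    intro c hcm
    exact hUcanon c ((PySem.List.mem_sorted U _ false c).1 hcm)
  have hTmem : ∀ c, c ∈ T ↔ c ∈ U := fun c => PySem.List.mem_sorted U _ false c
  have hkept : T.foldl stepKept [] = T.filter (minB U) := by
    have := keptFold U hUcanon T [] hTperm hTpw
    simpa using this
  have hstep : (fun (kept : List (PySem.Set Int)) (c : PySem.Set Int) =>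
      if (kept.any fun s => PySem.Set.issubset s c && !(PySem.Set.equal s c)) = true then kept
      else kept ++ [c]) = stepKept := rfl
  rw [hstep, hkept]
  symm
  apply List.filter_congr
  intro c hcm
  rw [Bool.eq_iff_iff, List.any_eq_true]
  constructor
  · rintro ⟨s, hsf, he⟩
    have hsT := List.mem_of_mem_filter hsf
    have : s = c := (canonEqual (hTcanon s hsT) (hUcanon c hcm)).1 he
    subst this
    exact (List.mem_filter.1 hsf).2
  · intro hmin
    exact ⟨c, List.mem_filter.2 ⟨(hTmem c).2 hcm, hmin⟩,
      (canonEqual (hUcanon c hcm) (hUcanon c hcm)).2 rfl⟩
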